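-- pv_equiv track=rewrite | github.com/nawonda/Leetcode-Solution | 1_Array/Bulbs.py | bulbs
-- ===== SOURCE A (Python) =====
-- def bulbs(A):
--     count = 0
--     state = 0 #state needed to be chekced
--     for i in range(len(A)):
--         if A[i] == state:
--             state = 1 - state
--             count += 1
--     return count
-- ===== SOURCE B (Python) =====
-- def bulbs(A):
--     # keep only the 0/1 entries (anything else can never equal the 0/1 state)
--     bits = [x for x in A if x == 0 or x == 1]
--     # skip the leading already-on bulbs
--     k = 0
--     while k < len(bits) and bits[k] == 1:
--         k += 1
--     rest = bits[k:]
--     if not rest: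
--         return 0
--     # one flip at the first off bulb, plus one per change of value afterwards
--     return 1 + sum(1 for x, y in zip(rest, rest[1:]) if x != y)
-- ===== Notes on version B (the rewrite author's own statement) =====
-- stated objective: alternative
-- what changed: Replaces the running state-toggle loop over indices by a landmark-and-transitions pass: filter to 0/1 entries, drop the leading 1s, then the answer is 1 plus the number of adjacent unequal pairs (0 if nothing remains).
import Mathlib
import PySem

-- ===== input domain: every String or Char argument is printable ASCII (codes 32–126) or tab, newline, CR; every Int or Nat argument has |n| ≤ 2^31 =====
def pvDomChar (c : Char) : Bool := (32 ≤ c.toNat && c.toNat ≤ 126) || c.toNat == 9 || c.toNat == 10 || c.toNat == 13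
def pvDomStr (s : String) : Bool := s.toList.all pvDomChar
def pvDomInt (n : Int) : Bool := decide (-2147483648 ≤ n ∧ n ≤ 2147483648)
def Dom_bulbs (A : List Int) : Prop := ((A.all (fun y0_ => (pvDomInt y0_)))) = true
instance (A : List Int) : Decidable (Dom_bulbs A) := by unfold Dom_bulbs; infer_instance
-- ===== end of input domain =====

-- B replaces A's running state-toggle over indices by filter + drop-leading-ones + count of
-- adjacent transitions (objective: alternative decomposition, same cost).

-- ===== PORT A =====
def bulbs (A : List Int) : Int :=
  ((PySem.List.pyRange 0 (PySem.List.len A) 1).foldl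
    (fun (cs : Int × Int) i =>
      if PySem.List.pyGetD A i 0 = cs.2 then (cs.1 + 1, 1 - cs.2) else cs)
    (0, 0)).1

-- ===== PORT B =====
def bulbs_alt (A : List Int) : Int :=
  let bits := A.filter (fun x => x == 0 || x == 1)
  let rest := bits.dropWhile (fun x => x == 1)
  match rest with
  | [] => 0
  | _ :: _ =>
    1 + ((rest.zip (rest.drop 1)).map (fun p => if p.1 = p.2 then (0 : Int) else 1)).sum

-- ===== PRECONDITION & SPEC =====
def Spec_bulbs (A : List Int) (out : Int) : Prop := out = bulbs_alt A
instance (A : List Int) (out : Int) : Decidable (Spec_bulbs A out) := by unfold Spec_bulbs; infer_instance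

-- ===== CLAIM (what is proved, stated in full; the proofs are below) =====
def Claim_equal_bulbs : Prop := ∀ (A : List Int), Dom_bulbs A → Spec_bulbs A (bulbs A)

-- ===== LEMMAS AND PROOFS =====

-- the per-element semantics of A's loop
def gBulbs : List Int → Int → Int
  | [], _ => 0
  | x :: t, s => if x = s then 1 + gBulbs t (1 - s) else gBulbs t s

-- transition count used by B
def transB (r : List Int) : Int :=
  ((r.zip (r.drop 1)).map (fun p => if p.1 = p.2 then (0 : Int) else 1)).sum

theorem transB_single (x : Int) : transB [x] = 0 := rfl
theorem transB_cons (x y : Int) (t : List Int) :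
    transB (x :: y :: t) = (if x = y then 0 else 1) + transB (y :: t) := by
  simp [transB, List.zip]

theorem bulbs_foldl (l : List Int) (c s : Int) :
    (l.foldl (fun (cs : Int × Int) x => if x = cs.2 then (cs.1 + 1, 1 - cs.2) else cs) (c, s)).1
      = c + gBulbs l s := by
  induction l generalizing c s with
  | nil => simp [gBulbs]
  | cons x t ih =>
    by_cases h : x = s
    · subst h
      calc (List.foldl (fun (cs : Int × Int) y => if y = cs.2 then (cs.1 + 1, 1 - cs.2) else cs) (c, x) (x :: t)).1
          = (List.foldl (fun (cs : Int × Int) y => if y = cs.2 then (cs.1 + 1, 1 - cs.2) else cs) (c + 1, 1 - x) t).1 := by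
            simp
        _ = (c + 1) + gBulbs t (1 - x) := ih _ _
        _ = c + gBulbs (x :: t) x := by simp [gBulbs]; omega
    · simp [gBulbs, h, ih]

theorem gBulbs_filter (l : List Int) (s : Int) (hs : s = 0 ∨ s = 1) :
    gBulbs l s = gBulbs (l.filter (fun x => x == 0 || x == 1)) s := by
  induction l generalizing s with
  | nil => rfl
  | cons x t ih =>
    by_cases hb : x = 0 ∨ x = 1
    · have : (x == 0 || x == 1) = true := by rcases hb with h | h <;> simp [h]
      by_cases hx : x = s
      · subst hx
        simp [gBulbs, List.filter, this, ih (1 - x) (by rcases hs with h | h <;> simp [h])]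
      · simp [gBulbs, List.filter, this, hx, ih s hs]
    · have hne : x ≠ s := by rcases hs with h | h <;> subst h <;> intro hc <;> exact hb (by omega)
      have : (x == 0 || x == 1) = false := by
        have h0 : x ≠ 0 := fun h => hb (Or.inl h)
        have h1 : x ≠ 1 := fun h => hb (Or.inr h)
        simp [h0, h1]
      simp [gBulbs, List.filter, this, hne, ih s hs]

-- key lemma: on 0/1 lists, gBulbs with state 1-c counts the transitions of c :: t
theorem gBulbs_trans (t : List Int) (c : Int) (hc : c = 0 ∨ c = 1)
    (ht : ∀ x ∈ t, x = 0 ∨ x = 1) :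
    gBulbs t (1 - c) = transB (c :: t) := by
  induction t generalizing c with
  | nil => simp [gBulbs, transB_single]
  | cons d t' ih =>
    have hd : d = 0 ∨ d = 1 := ht d (by simp)
    have ht' : ∀ x ∈ t', x = 0 ∨ x = 1 := fun x hx => ht x (by simp [hx])
    rw [transB_cons]
    by_cases hdc : d = 1 - c
    · have hne : c ≠ d := by rcases hc with h | h <;> subst h <;> omega
      have h2 : 1 - (1 - c) = 1 - d := by rcases hc with h | h <;> subst h <;> omega
      simp only [gBulbs, if_pos hdc, h2, ih d hd ht']
      simp [hne]
    · have heq : d = c := by rcases hc with h | h <;> rcases hd with h' | h' <;> omega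
      have h2 : (1 - c) = 1 - d := by omega
      have hstep : gBulbs (d :: t') (1 - c) = gBulbs t' (1 - c) := by simp [gBulbs, hdc]
      rw [hstep, h2, ih d hd ht']
      simp [heq]

theorem gBulbs_drop (bs : List Int) (hb : ∀ x ∈ bs, x = 0 ∨ x = 1) :
    gBulbs bs 0 =
      (match bs.dropWhile (fun x => x == 1) with
       | [] => (0 : Int)
       | r@(_ :: _) => 1 + transB r) := by
  induction bs with
  | nil => rfl
  | cons x t ih =>
    have hx : x = 0 ∨ x = 1 := hb x (by simp)
    have ht : ∀ y ∈ t, y = 0 ∨ y = 1 := fun y hy => hb y (by simp [hy])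
    rcases hx with h | h
    · subst h
      have h1 : gBulbs (0 :: t) 0 = 1 + gBulbs t 1 := by simp [gBulbs]
      have h2 : gBulbs t 1 = transB (0 :: t) := by
        have := gBulbs_trans t 0 (Or.inl rfl) ht
        simpa using this
      simp [List.dropWhile, h1, h2]
    · subst h
      have h1 : gBulbs (1 :: t) 0 = gBulbs t 0 := by simp [gBulbs]
      simp [List.dropWhile, h1, ih ht]

theorem filter_bits (A : List Int) :
    ∀ x ∈ A.filter (fun x => x == 0 || x == 1), x = 0 ∨ x = 1 := by
  intro x hx
  have := List.of_mem_filter hx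
  simpa using this

-- ===== VERDICT (by name: the statement is the Claim_ definition above) =====
theorem bulbs_spec : Claim_equal_bulbs := by
  intro A _
  show bulbs A = bulbs_alt A
  have hA : bulbs A = gBulbs A 0 := by
    unfold bulbs
    rw [show PySem.List.len A = (A.length : Int) from PySem.List.len_eq A,
        PySem.List.foldl_pyRange_zero_pyGetD' A 0
          (fun (cs : Int × Int) x => if x = cs.2 then (cs.1 + 1, 1 - cs.2) else cs) (0, 0),
        bulbs_foldl A 0 0, zero_add]
  rw [hA, gBulbs_filter A 0 (Or.inl rfl), gBulbs_drop _ (filter_bits A)]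
  unfold bulbs_alt
  cases h : (A.filter (fun x => x == 0 || x == 1)).dropWhile (fun x => x == 1) with
  | nil => simp [h]
  | cons a r => simp [h, transB]
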